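-- pv_equiv track=rewrite | github.com/BZohorskys-Web-Scraping-Repos/Wikipedia | src/wiki.py | setPages
-- ===== SOURCE A (Python) =====
-- def setPages(max_x, max_y, header, footer, text):
--     headerFooter = header + footer
--     idx = 0
--     max_y_modifier = 0
--     while idx < len(headerFooter):
--         i = 0
--         while i < max_y and idx < len(headerFooter):
--             j = 0
--             while j < max_x and idx < len(headerFooter):
--                 if headerFooter[idx] == '\n':
--                     j = max_x - 1
--                 j += 1
--                 idx += 1
--             i += 1
--             max_y_modifier += 1
--
--     pages = []
--     modified_max_y = max_y - max_y_modifier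
--     if modified_max_y < 1:
--         errorResponse = "Sorry, your window is too small to display the output correctly. Increase it if possible. Quit (q)."
--         pages.append(errorResponse)
--         return pages
--
--     idx = 0
--     while idx < len(text):
--         page = [header]
--         i = 0
--         while i < modified_max_y and idx < len(text):
--             j = 0
--             while j < max_x and idx < len(text):
--                 if text[idx] == '\n':
--                     j = max_x - 1
--                 page.append(text[idx])
--                 j += 1
--                 idx += 1
--             i += 1
--         page.append(footer)
--         pages.append(''.join(page))
--
--     for idx, page in enumerate(pages):
--         pageNumber = str(idx + 1)
--         newHeader = "(" + pageNumber + "/" + str(len(pages)) + ")\n"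
--         pages[idx] = page.replace(header, newHeader)
--
--     return pages
-- ===== SOURCE B (Python) =====
-- def setPages(max_x, max_y, header, footer, text):
--     # one pass over a string: lengths of the wrapped lines (a line ends at
--     # max_x characters, or immediately after a '\n')
--     def line_lengths(s):
--         lens = []
--         cur = 0
--         for ch in s:
--             cur += 1
--             if ch == '\n' or cur == max_x:
--                 lens.append(cur)
--                 cur = 0
--         if cur:
--             lens.append(cur)
--         return lens
--
--     max_y_modifier = len(line_lengths(header + footer))
--     modified_max_y = max_y - max_y_modifier
--     if modified_max_y < 1:
--         return ["Sorry, your window is too small to display the output correctly. Increase it if possible. Quit (q)."]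
--
--     tlens = line_lengths(text)
--     pages = []
--     pos = 0
--     i = 0
--     while i < len(tlens):
--         chunk = sum(tlens[i:i + modified_max_y])
--         pages.append(header + text[pos:pos + chunk] + footer)
--         pos += chunk
--         i += modified_max_y
--
--     total = str(len(pages))
--     return [p.replace(header, "(" + str(k + 1) + "/" + total + ")\n")
--             for k, p in enumerate(pages)]
-- ===== Notes on version B (the rewrite author's own statement) =====
-- stated objective: simpler
-- what changed: Replaces A's two triple-nested character-by-character while loops with a single one-pass helper returning the wrapped line lengths; pages are then built by string slicing at sums of those lengths (constant-factor speedup: C-level slices instead of per-character list appends and joins).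
import Mathlib
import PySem

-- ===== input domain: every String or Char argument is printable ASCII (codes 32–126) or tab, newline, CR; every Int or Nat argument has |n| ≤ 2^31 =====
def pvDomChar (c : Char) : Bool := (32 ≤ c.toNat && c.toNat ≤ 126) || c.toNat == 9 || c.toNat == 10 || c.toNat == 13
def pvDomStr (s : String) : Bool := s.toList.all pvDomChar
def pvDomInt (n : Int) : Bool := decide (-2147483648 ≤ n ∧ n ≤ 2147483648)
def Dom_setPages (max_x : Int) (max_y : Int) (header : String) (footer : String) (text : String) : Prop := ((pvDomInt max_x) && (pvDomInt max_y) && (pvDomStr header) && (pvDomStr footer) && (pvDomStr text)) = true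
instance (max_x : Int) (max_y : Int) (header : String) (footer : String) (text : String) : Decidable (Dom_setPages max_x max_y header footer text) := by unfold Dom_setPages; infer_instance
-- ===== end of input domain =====

-- B replaces A's two triple-nested character-by-character while loops by a one-pass
-- wrapped-line-length helper plus slicing; objective: simpler. Equivalence is about the
-- return value (neither version mutates its arguments).

def pvErrorPage : String := "Sorry, your window is too small to display the output correctly. Increase it if possible. Quit (q)."

-- phase 3 (identical final loop in both Python versions): pages[idx] = page.replace(header, "(idx+1/N)\n")
def pvRenumber (hdr : List Char) (pages : List (List Char)) : List String :=
  (PySem.List.enumerate pages).map (fun kp =>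
    String.ofList (PySem.Chars.replace kp.2 hdr
      ('(' :: PySem.Int.toChars (kp.1 + 1) ++ '/' :: PySem.Int.toChars (pages.length : Int) ++ [')', '\n'])))

-- ===== PORT A =====

-- innermost `while j < max_x and idx < len(...)` of phase 1 (advances idx only)
def lineA (maxx : Int) : List Char → Int → List Char
  | [], _ => []
  | c :: cs, j => if j < maxx then lineA maxx cs ((if c = '\n' then maxx - 1 else j) + 1) else c :: cs

-- `while i < max_y and idx < len(...)` of phase 1, counting max_y_modifier
def iLoopA (maxx maxy : Int) (cs : List Char) (i m : Int) : List Char × Int :=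
  if i < maxy ∧ cs ≠ [] then iLoopA maxx maxy (lineA maxx cs 0) (i + 1) (m + 1) else (cs, m)
termination_by (maxy - i).toNat
decreasing_by omega

-- outermost `while idx < len(headerFooter)` of phase 1; fuel = |headerFooter| is enough
-- wherever the Python loop terminates (each pass consumes at least one character there)
def outerA (maxx maxy : Int) : Nat → List Char → Int → Int
  | 0, _, m => m
  | f + 1, cs, m =>
    if cs ≠ [] then
      let p := iLoopA maxx maxy cs 0 m
      outerA maxx maxy f p.1 p.2
    else m

-- innermost `while j < max_x and idx < len(text)` of phase 2 (collects page chars)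
def lineB (maxx : Int) : List Char → Int → List Char × List Char
  | [], _ => ([], [])
  | c :: cs, j =>
    if j < maxx then
      let p := lineB maxx cs ((if c = '\n' then maxx - 1 else j) + 1)
      (c :: p.1, p.2)
    else ([], c :: cs)

-- `while i < modified_max_y and idx < len(text)` of phase 2
def pageLoopA (maxx mody : Int) (cs : List Char) (i : Int) (acc : List Char) : List Char × List Char :=
  if i < mody ∧ cs ≠ [] then
    let p := lineB maxx cs 0
    pageLoopA maxx mody p.2 (i + 1) (acc ++ p.1)
  else (acc, cs)
termination_by (mody - i).toNat
decreasing_by omega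

-- outermost `while idx < len(text)` of phase 2; fuel = |text| (same remark as outerA)
def pagesA (maxx mody : Int) (hdr ftr : List Char) : Nat → List Char → List (List Char)
  | 0, _ => []
  | f + 1, cs =>
    if cs ≠ [] then
      let p := pageLoopA maxx mody cs 0 []
      (hdr ++ p.1 ++ ftr) :: pagesA maxx mody hdr ftr f p.2
    else []

def setPages (max_x : Int) (max_y : Int) (header : String) (footer : String) (text : String) : List String :=
  let hf := header.toList ++ footer.toList
  let m := outerA max_x max_y hf.length hf 0
  let mody := max_y - m
  if mody < 1 then [pvErrorPage]
  else pvRenumber header.toList (pagesA max_x mody header.toList footer.toList text.toList.length text.toList)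

-- ===== PORT B =====

-- Source B line_lengths: one pass; a line ends at max_x characters or right after '\n'
def lineLensGo (maxx : Int) : List Char → Int → List Int → List Int
  | [], cur, lens => if cur ≠ 0 then lens ++ [cur] else lens
  | c :: cs, cur, lens =>
    if c = '\n' ∨ cur + 1 = maxx then lineLensGo maxx cs 0 (lens ++ [cur + 1])
    else lineLensGo maxx cs (cur + 1) lens

def lineLens (maxx : Int) (cs : List Char) : List Int := lineLensGo maxx cs 0 []

-- Source B page loop: take modified_max_y line lengths at a time, slice the text accordingly;
-- fuel = |tlens| is enough wherever it runs (modified_max_y ≥ 1 there)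
def chunksB (mody : Int) (hdr ftr : List Char) : Nat → List Int → List Char → List (List Char)
  | 0, _, _ => []
  | _ + 1, [], _ => []
  | f + 1, l :: ls, rest =>
    let chunk := ((l :: ls).take mody.toNat).sum
    (hdr ++ rest.take chunk.toNat ++ ftr) :: chunksB mody hdr ftr f ((l :: ls).drop mody.toNat) (rest.drop chunk.toNat)

def setPages_alt (max_x : Int) (max_y : Int) (header : String) (footer : String) (text : String) : List String :=
  let mody := max_y - ((lineLens max_x (header.toList ++ footer.toList)).length : Int)
  if mody < 1 then [pvErrorPage]
  else
    let tl := lineLens max_x text.toList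
    pvRenumber header.toList (chunksB mody header.toList footer.toList tl.length tl text.toList)

-- ===== PRECONDITION & SPEC =====
-- Pre_ excludes exactly the inputs on which Python A never returns: with characters left to
-- paginate and max_x < 1 (or max_y < 1 with a non-empty header+footer) its while loops make
-- no progress and loop forever.
def Pre_setPages (max_x : Int) (max_y : Int) (header : String) (footer : String) (text : String) : Prop :=
  (1 ≤ max_x ∧ 1 ≤ max_y) ∨ (header = "" ∧ footer = "" ∧ (max_y < 1 ∨ 1 ≤ max_x ∨ text = ""))
instance (max_x : Int) (max_y : Int) (header : String) (footer : String) (text : String) : Decidable (Pre_setPages max_x max_y header footer text) := by unfold Pre_setPages; infer_instance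

def pvWitness_setPages : Int × Int × String × String × String := (5, 4, "H\n", "F\n", "hi\nthere ok")

def Spec_setPages (max_x : Int) (max_y : Int) (header : String) (footer : String) (text : String) (out : List String) : Prop := out = setPages_alt max_x max_y header footer text
instance (max_x : Int) (max_y : Int) (header : String) (footer : String) (text : String) (out : List String) : Decidable (Spec_setPages max_x max_y header footer text out) := by unfold Spec_setPages; infer_instance

-- ===== CLAIM (what is proved, stated in full; the proofs are below) =====
def Claim_equal_setPages : Prop := ∀ (max_x : Int) (max_y : Int) (header : String) (footer : String) (text : String), Dom_setPages max_x max_y header footer text → Pre_setPages max_x max_y header footer text → Spec_setPages max_x max_y header footer text (setPages max_x max_y header footer text)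

-- ===== LEMMAS AND PROOFS =====

-- accumulator of lineLensGo is append-only
theorem lineLensGo_acc (maxx : Int) (cs : List Char) (cur : Int) (lens : List Int) :
    lineLensGo maxx cs cur lens = lens ++ lineLensGo maxx cs cur [] := by
  induction cs generalizing cur lens with
  | nil => by_cases h : cur ≠ 0 <;> simp [lineLensGo, h]
  | cons c cs ih =>
    by_cases h : c = '\n' ∨ cur + 1 = maxx
    · rw [lineLensGo, if_pos h, lineLensGo, if_pos h, ih, ih 0 ([] ++ [cur + 1])]
      simp
    · rw [lineLensGo, if_neg h, lineLensGo, if_neg h, ih]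

-- lineA is the remaining-input projection of lineB
theorem lineA_eq_lineB (maxx : Int) (cs : List Char) (j : Int) :
    lineA maxx cs j = (lineB maxx cs j).2 := by
  induction cs generalizing j with
  | nil => simp [lineA, lineB]
  | cons c cs ih => by_cases h : j < maxx <;> simp [lineA, lineB, h, ih]

-- synchronised line lemma: one wrapped line of lineB matches one emitted length of lineLensGo
theorem line_sync (maxx : Int) (hmx : 1 ≤ maxx) :
    ∀ (cs : List Char) (j : Int), 0 ≤ j → j < maxx →
      cs = (lineB maxx cs j).1 ++ (lineB maxx cs j).2 ∧
      lineLensGo maxx cs j [] =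
        (if cs = [] ∧ j = 0 then []
         else (j + ((lineB maxx cs j).1.length : Int)) :: lineLensGo maxx (lineB maxx cs j).2 0 []) := by
  intro cs
  induction cs with
  | nil =>
    intro j h0 hj
    by_cases hz : j = 0 <;> simp [lineB, lineLensGo, hz]
  | cons c cs ih =>
    intro j h0 hj
    by_cases he : c = '\n' ∨ j + 1 = maxx
    · -- line ends here: lineB recursion hits j' ≥ maxx
      have hj' : ¬ ((if c = '\n' then maxx - 1 else j) + 1 < maxx) := by
        rcases he with h | h <;> simp [h] <;> omega
      have hB : lineB maxx (c :: cs) j = ([c], cs) := by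
        rw [lineB, if_pos hj]
        cases cs with
        | nil => simp [lineB]
        | cons d ds => simp [lineB, hj']
      rw [lineLensGo, if_pos he, lineLensGo_acc, hB]
      refine ⟨by simp, ?_⟩
      simp
    · -- line continues
      have hne : ¬ (c = '\n') := fun h => he (Or.inl h)
      have hlt : (if c = '\n' then maxx - 1 else j) + 1 < maxx := by
        simp [hne]; omega
      have hB : lineB maxx (c :: cs) j =
          (c :: (lineB maxx cs (j + 1)).1, (lineB maxx cs (j + 1)).2) := by
        rw [lineB, if_pos hj]; simp [hne]
      obtain ⟨hsplit, hlens⟩ := ih (j + 1) (by omega) (by simpa [hne] using hlt)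
      rw [lineLensGo, if_neg he, hB]
      constructor
      · simpa using hsplit
      · rw [hlens]
        have : ¬ (cs = [] ∧ j + 1 = 0) := by omega
        simp [this]
        push_cast
        ring_nf
theorem line_step (maxx : Int) (hmx : 1 ≤ maxx) (cs : List Char) (hcs : cs ≠ []) :
    cs = (lineB maxx cs 0).1 ++ (lineB maxx cs 0).2 ∧
    (lineB maxx cs 0).1 ≠ [] ∧
    lineLens maxx cs = ((lineB maxx cs 0).1.length : Int) :: lineLens maxx (lineB maxx cs 0).2 := by
  obtain ⟨hsplit, hlens⟩ := line_sync maxx hmx cs 0 le_rfl (by omega)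
  refine ⟨hsplit, ?_, ?_⟩
  · cases cs with
    | nil => exact absurd rfl hcs
    | cons c cs' => rw [lineB, if_pos (by omega : (0:Int) < maxx)]; simp
  · rw [lineLens, hlens, if_neg (by simp [hcs])]
    simp [lineLens]

-- every emitted line length is positive
theorem lineLens_pos (maxx : Int) :
    ∀ (cs : List Char) (cur : Int) (x : Int), 0 ≤ cur → x ∈ lineLensGo maxx cs cur [] → 0 < x := by
  intro cs
  induction cs with
  | nil =>
    intro cur x h0 hx
    by_cases hz : cur ≠ 0 <;> simp [lineLensGo, hz] at hx <;> omega
  | cons c cs ih =>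
    intro cur x h0 hx
    by_cases he : c = '\n' ∨ cur + 1 = maxx
    · rw [lineLensGo, if_pos he, lineLensGo_acc] at hx
      simp at hx
      rcases hx with h | h
      · omega
      · exact ih 0 x le_rfl h
    · rw [lineLensGo, if_neg he] at hx
      exact ih (cur + 1) x (by omega) hx

theorem lineLens_sum_nonneg (maxx : Int) (cs : List Char) (k : Nat) :
    0 ≤ ((lineLens maxx cs).take k).sum := by
  apply List.sum_nonneg
  intro x hx
  exact le_of_lt (lineLens_pos maxx cs 0 x le_rfl (List.mem_of_mem_take hx))

theorem lineLens_take_sum_pos (maxx : Int) (hmx : 1 ≤ maxx) (cs : List Char) (hcs : cs ≠ [])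
    (k : Nat) (hk : 1 ≤ k) : 1 ≤ ((lineLens maxx cs).take k).sum := by
  obtain ⟨_, hane, hLL⟩ := line_step maxx hmx cs hcs
  obtain ⟨k', rfl⟩ : ∃ k', k = k' + 1 := ⟨k - 1, by omega⟩
  rw [hLL]
  have h1 : 0 < (lineB maxx cs 0).1.length := List.length_pos_of_ne_nil hane
  have h2 : 0 ≤ ((lineLens maxx (lineB maxx cs 0).2).take k').sum :=
    lineLens_sum_nonneg maxx _ _
  simp
  omega

-- phase-2 inner loop consumes exactly the text covered by the first (mody - i) line lengths
theorem pageLoopA_spec (maxx mody : Int) (hmx : 1 ≤ maxx) :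
    ∀ (cs : List Char) (i : Int) (acc : List Char),
      pageLoopA maxx mody cs i acc =
        (acc ++ cs.take (((lineLens maxx cs).take (mody - i).toNat).sum).toNat,
         cs.drop (((lineLens maxx cs).take (mody - i).toNat).sum).toNat) ∧
      lineLens maxx (cs.drop (((lineLens maxx cs).take (mody - i).toNat).sum).toNat) =
        (lineLens maxx cs).drop (mody - i).toNat := by
  have main : ∀ (n : Nat) (cs : List Char), cs.length = n → ∀ (i : Int) (acc : List Char),
      pageLoopA maxx mody cs i acc =
        (acc ++ cs.take (((lineLens maxx cs).take (mody - i).toNat).sum).toNat,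
         cs.drop (((lineLens maxx cs).take (mody - i).toNat).sum).toNat) ∧
      lineLens maxx (cs.drop (((lineLens maxx cs).take (mody - i).toNat).sum).toNat) =
        (lineLens maxx cs).drop (mody - i).toNat := by
    intro n
    induction n using Nat.strong_induction_on with
    | _ n ih =>
      intro cs hlen i acc
      by_cases hc : i < mody ∧ cs ≠ []
      · obtain ⟨hsplit, hane, hLL⟩ := line_step maxx hmx cs hc.2
        set a := (lineB maxx cs 0).1 with ha
        set r := (lineB maxx cs 0).2 with hr
        have hrlen : r.length < n := by
          have hpos : 0 < a.length := List.length_pos_of_ne_nil hane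
          rw [← hlen, hsplit]
          simp
          omega
        have hk : (mody - i).toNat = (mody - (i + 1)).toNat + 1 := by omega
        have ht' : 0 ≤ ((lineLens maxx r).take (mody - (i + 1)).toNat).sum :=
          lineLens_sum_nonneg maxx r _
        have hsum : (((lineLens maxx cs).take (mody - i).toNat).sum).toNat
            = a.length + (((lineLens maxx r).take (mody - (i + 1)).toNat).sum).toNat := by
          rw [hLL, hk]
          simp
          omega
        obtain ⟨ih1, ih2⟩ := ih r.length hrlen r rfl (i + 1) (acc ++ a)
        have htake : cs.take ((((lineLens maxx cs).take (mody - i).toNat).sum).toNat)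
            = a ++ r.take ((((lineLens maxx r).take (mody - (i + 1)).toNat).sum).toNat) := by
          rw [hsum]
          conv_lhs => rw [hsplit]
          rw [List.take_append]
          congr 1
          · exact List.take_of_length_le (by omega)
          · congr 1; omega
        have hdrop : cs.drop ((((lineLens maxx cs).take (mody - i).toNat).sum).toNat)
            = r.drop ((((lineLens maxx r).take (mody - (i + 1)).toNat).sum).toNat) := by
          rw [hsum]
          conv_lhs => rw [hsplit]
          rw [List.drop_append]
          rw [List.drop_of_length_le (by omega)]
          simp
        constructor
        · rw [pageLoopA, if_pos hc, ih1, htake, hdrop]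
          simp
        · rw [hdrop, ih2, hLL, hk]
          simp
      · have hstop : pageLoopA maxx mody cs i acc = (acc, cs) := by
          rw [pageLoopA, if_neg hc]
        rcases (not_and_or.mp hc) with h | h
        · have hk : (mody - i).toNat = 0 := by omega
          rw [hstop, hk]
          simp
        · have hcs : cs = [] := by simpa using h
          subst hcs
          rw [hstop]
          simp [lineLens, lineLensGo]
  intro cs i acc
  exact main cs.length cs rfl i acc

-- phase-1 inner loop: same consumption, counting lines instead of collecting them
theorem iLoopA_spec (maxx maxy : Int) (hmx : 1 ≤ maxx) :
    ∀ (cs : List Char) (i m : Int),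
      iLoopA maxx maxy cs i m =
        (cs.drop (((lineLens maxx cs).take (maxy - i).toNat).sum).toNat,
         m + (((lineLens maxx cs).take (maxy - i).toNat).length : Int)) ∧
      lineLens maxx (cs.drop (((lineLens maxx cs).take (maxy - i).toNat).sum).toNat) =
        (lineLens maxx cs).drop (maxy - i).toNat := by
  have main : ∀ (n : Nat) (cs : List Char), cs.length = n → ∀ (i m : Int),
      iLoopA maxx maxy cs i m =
        (cs.drop (((lineLens maxx cs).take (maxy - i).toNat).sum).toNat,
         m + (((lineLens maxx cs).take (maxy - i).toNat).length : Int)) ∧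
      lineLens maxx (cs.drop (((lineLens maxx cs).take (maxy - i).toNat).sum).toNat) =
        (lineLens maxx cs).drop (maxy - i).toNat := by
    intro n
    induction n using Nat.strong_induction_on with
    | _ n ih =>
      intro cs hlen i m
      by_cases hc : i < maxy ∧ cs ≠ []
      · obtain ⟨hsplit, hane, hLL⟩ := line_step maxx hmx cs hc.2
        set a := (lineB maxx cs 0).1 with ha
        set r := (lineB maxx cs 0).2 with hr
        have hrlen : r.length < n := by
          have hpos : 0 < a.length := List.length_pos_of_ne_nil hane
          rw [← hlen, hsplit]
          simp
          omega
        have hk : (maxy - i).toNat = (maxy - (i + 1)).toNat + 1 := by omega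
        have ht' : 0 ≤ ((lineLens maxx r).take (maxy - (i + 1)).toNat).sum :=
          lineLens_sum_nonneg maxx r _
        have hsum : (((lineLens maxx cs).take (maxy - i).toNat).sum).toNat
            = a.length + (((lineLens maxx r).take (maxy - (i + 1)).toNat).sum).toNat := by
          rw [hLL, hk]
          simp
          omega
        obtain ⟨ih1, ih2⟩ := ih r.length hrlen r rfl (i + 1) (m + 1)
        have hdrop : cs.drop ((((lineLens maxx cs).take (maxy - i).toNat).sum).toNat)
            = r.drop ((((lineLens maxx r).take (maxy - (i + 1)).toNat).sum).toNat) := by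
          rw [hsum]
          conv_lhs => rw [hsplit]
          rw [List.drop_append]
          rw [List.drop_of_length_le (by omega)]
          simp
        constructor
        · rw [iLoopA, if_pos hc, lineA_eq_lineB, ← hr, ih1, hdrop, hLL, hk]
          congr 1
          simp
          push_cast
          ring
        · rw [hdrop, ih2, hLL, hk]
          simp
      · have hstop : iLoopA maxx maxy cs i m = (cs, m) := by
          rw [iLoopA, if_neg hc]
        rcases (not_and_or.mp hc) with h | h
        · have hk : (maxy - i).toNat = 0 := by omega
          rw [hstop, hk]
          simp
        · have hcs : cs = [] := by simpa using h
          subst hcs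
          rw [hstop]
          simp [lineLens, lineLensGo]
  intro cs i m
  exact main cs.length cs rfl i m

-- phase 1 computes the number of wrapped lines
theorem outerA_spec (maxx maxy : Int) (hmx : 1 ≤ maxx) (hmy : 1 ≤ maxy) :
    ∀ (fuel : Nat) (cs : List Char) (m : Int), cs.length ≤ fuel →
      outerA maxx maxy fuel cs m = m + ((lineLens maxx cs).length : Int) := by
  intro fuel
  induction fuel with
  | zero =>
    intro cs m hlen
    have : cs = [] := by simpa using List.eq_nil_of_length_eq_zero (by omega)
    subst this
    simp [outerA, lineLens, lineLensGo]
  | succ f ih =>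
    intro cs m hlen
    by_cases hcs : cs = []
    · subst hcs
      simp [outerA, lineLens, lineLensGo]
    · obtain ⟨hI, hLd⟩ := iLoopA_spec maxx maxy hmx cs 0 m
      have hm0 : (maxy - 0 : Int) = maxy := by ring
      rw [hm0] at hI hLd
      have ht1 : 1 ≤ ((lineLens maxx cs).take maxy.toNat).sum := by
        have := lineLens_take_sum_pos maxx hmx cs hcs maxy.toNat (by omega)
        exact this
      rw [outerA, if_pos hcs, hI, ih _ _ (by simp; omega), hLd]
      have h1 := List.length_take (l := lineLens maxx cs) (i := maxy.toNat)
      have h2 := List.length_drop (l := lineLens maxx cs) (i := maxy.toNat)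
      push_cast
      omega

-- phase 2 equals chunking by line lengths
theorem pagesA_eq_chunksB (maxx mody : Int) (hdr ftr : List Char)
    (hmx : 1 ≤ maxx) (hmy : 1 ≤ mody) :
    ∀ (f1 f2 : Nat) (cs : List Char), cs.length ≤ f1 → (lineLens maxx cs).length ≤ f2 →
      pagesA maxx mody hdr ftr f1 cs = chunksB mody hdr ftr f2 (lineLens maxx cs) cs := by
  intro f1
  induction f1 with
  | zero =>
    intro f2 cs hlen _
    have : cs = [] := by simpa using List.eq_nil_of_length_eq_zero (by omega)
    subst this
    have hnil : lineLens maxx [] = [] := by simp [lineLens, lineLensGo]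
    rw [hnil]
    cases f2 <;> simp [pagesA, chunksB]
  | succ f ih =>
    intro f2 cs hlen hlen2
    by_cases hcs : cs = []
    · subst hcs
      have hnil : lineLens maxx [] = [] := by simp [lineLens, lineLensGo]
      rw [hnil]
      cases f2 <;> simp [pagesA, chunksB]
    · obtain ⟨hsplit, hane, hLL⟩ := line_step maxx hmx cs hcs
      obtain ⟨hP, hLd⟩ := pageLoopA_spec maxx mody hmx cs 0 []
      have hm0 : (mody - 0 : Int) = mody := by ring
      rw [hm0] at hP hLd
      have ht1 : 1 ≤ ((lineLens maxx cs).take mody.toNat).sum := by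
        have := lineLens_take_sum_pos maxx hmx cs hcs mody.toNat (by omega)
        exact this
      have h1 : 1 ≤ (lineLens maxx cs).length := by rw [hLL]; simp
      obtain ⟨g, rfl⟩ : ∃ g, f2 = g + 1 := ⟨f2 - 1, by omega⟩
      rw [pagesA, if_pos hcs]
      simp only [hP, List.nil_append]
      conv_rhs => rw [hLL]
      rw [chunksB, ← hLL]
      congr 1
      rw [← hLd]
      apply ih
      · simp [List.length_drop]
        omega
      · rw [hLd]
        simp [List.length_drop]
        omega


-- ===== VERDICT (by name: the statement is the Claim_ definition above) =====
theorem setPages_spec : Claim_equal_setPages := by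
  intro max_x max_y header footer text _ hpre
  unfold Spec_setPages setPages setPages_alt
  have hnil : ∀ mx : Int, lineLens mx [] = [] := fun mx => by simp [lineLens, lineLensGo]
  rcases hpre with ⟨hmx, hmy⟩ | ⟨hh, hf, hrest⟩
  · have hout := outerA_spec max_x max_y hmx hmy (header.toList ++ footer.toList).length
      (header.toList ++ footer.toList) 0 le_rfl
    simp only [hout, zero_add]
    split_ifs with hlt
    · rfl
    · rw [pagesA_eq_chunksB max_x _ header.toList footer.toList hmx (by omega)
        text.toList.length (lineLens max_x text.toList).length text.toList le_rfl le_rfl]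
  · subst hh; subst hf
    have h0 : ("".toList ++ "".toList : List Char) = [] := by decide
    simp only [h0, hnil]
    have houter : outerA max_x max_y 0 [] 0 = 0 := rfl
    simp only [houter, List.length_nil, Nat.cast_zero, sub_zero]
    rcases hrest with hmy | hmx | htext
    · rw [if_pos (by omega), if_pos (by omega)]
    · by_cases hlt : max_y < 1
      · rw [if_pos (by omega), if_pos (by omega)]
      · rw [if_neg (by omega), if_neg (by omega)]
        rw [pagesA_eq_chunksB max_x _ "".toList "".toList hmx (by omega)
          text.toList.length (lineLens max_x text.toList).length text.toList le_rfl le_rfl]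
    · subst htext
      have h1 : ("".toList : List Char) = [] := by decide
      simp only [h1, hnil]
      by_cases hlt : max_y < 1
      · rw [if_pos (by omega), if_pos (by omega)]
      · rw [if_neg (by omega), if_neg (by omega)]
        rfl
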